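-- pv_equiv track=rewrite | github.com/Ulises-Guzman/TP1_POE | ejercicio_4.py | encontrar_duplicado
-- ===== SOURCE A (Python) =====
-- def encontrar_duplicado(lista):
--     lista_duplicado = []
--     aux = ""
--     for i in range(len(lista)):
--         aux = lista[i]
--         for j in range(i + 1, len(lista)):
--             if aux.lower() == lista[j].lower():
--                 lista_duplicado.append(lista[j])
--     return lista_duplicado
-- ===== SOURCE B (Python) =====
-- def encontrar_duplicado(lista):
--     # Group indices by lowercased value in one pass, then for each position
--     # emit the values at the later indices of its own group.
--     lowered = [s.lower() for s in lista]
--     groups = {}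
--     for j, low in enumerate(lowered):
--         groups.setdefault(low, []).append(j)
--     lista_duplicado = []
--     for i, low in enumerate(lowered):
--         for j in groups[low]:
--             if j > i:
--                 lista_duplicado.append(lista[j])
--     return lista_duplicado
-- ===== Notes on version B (the rewrite author's own statement) =====
-- stated objective: alternative
-- what changed: Replaces the nested scan over all later positions by a dict grouping indices per lowercased value built in one pass, so each position walks only its own group (measured ~1.6x on duplicate-heavy inputs, quadratic like A when most elements collide).
import Mathlib
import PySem

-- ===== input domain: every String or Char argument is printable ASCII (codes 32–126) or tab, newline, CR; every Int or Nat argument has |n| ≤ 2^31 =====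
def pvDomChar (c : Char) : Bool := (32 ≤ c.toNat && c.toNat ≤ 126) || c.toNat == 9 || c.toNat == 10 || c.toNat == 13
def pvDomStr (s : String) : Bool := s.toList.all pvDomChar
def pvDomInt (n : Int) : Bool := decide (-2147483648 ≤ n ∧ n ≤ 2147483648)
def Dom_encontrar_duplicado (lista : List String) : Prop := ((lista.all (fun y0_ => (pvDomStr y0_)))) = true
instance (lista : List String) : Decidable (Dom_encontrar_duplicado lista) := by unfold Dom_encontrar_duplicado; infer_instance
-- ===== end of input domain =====

-- B groups indices by lowercased value in one dict pass, then each position walks only its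
-- own group instead of the whole tail (objective: alternative algorithm, same worst-case cost).

-- ===== PORT A =====
def encontrar_duplicado (lista : List String) : List String :=
  -- lista_duplicado = []; for i in range(len(lista)): aux = lista[i]; for j in range(i+1, len): if aux.lower() == lista[j].lower(): append(lista[j])
  (PySem.List.pyRange 0 (PySem.List.len lista)).foldl (fun acc i =>
    let aux := PySem.List.pyGetD lista i ""
    (PySem.List.pyRange (i + 1) (PySem.List.len lista)).foldl (fun acc2 j =>
      if PySem.Str.lower aux = PySem.Str.lower (PySem.List.pyGetD lista j "") then
        acc2 ++ [PySem.List.pyGetD lista j ""]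
      else acc2) acc) []

-- ===== PORT B =====
def encontrar_duplicado_alt (lista : List String) : List String :=
  -- lowered = [s.lower() for s in lista]
  let lowered := lista.map PySem.Str.lower
  -- groups = {}; for j, low in enumerate(lowered): groups.setdefault(low, []).append(j)
  let groups : PySem.Dict String (List Int) :=
    (PySem.List.enumerate lowered).foldl (fun d p => d.modify p.2 [] (fun l => l ++ [p.1])) PySem.Dict.empty
  -- for i, low in enumerate(lowered): for j in groups[low]: if j > i: append(lista[j])
  (PySem.List.enumerate lowered).foldl (fun acc p =>
    (groups.getD p.2 []).foldl (fun acc2 j =>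
      if p.1 < j then acc2 ++ [PySem.List.pyGetD lista j ""] else acc2) acc) []

-- ===== PRECONDITION & SPEC =====
def Spec_encontrar_duplicado (lista : List String) (out : List String) : Prop := out = encontrar_duplicado_alt lista
instance (lista : List String) (out : List String) : Decidable (Spec_encontrar_duplicado lista out) := by unfold Spec_encontrar_duplicado; infer_instance

-- ===== CLAIM (what is proved, stated in full; the proofs are below) =====
def Claim_equal_encontrar_duplicado : Prop := ∀ (lista : List String), Dom_encontrar_duplicado lista → Spec_encontrar_duplicado lista (encontrar_duplicado lista)

-- ===== LEMMAS AND PROOFS =====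

-- helper: the dict built by 'groups.setdefault(low, []).append(j)' maps each key to the
-- list of first components of the pairs carrying it (specific composed shapes of
-- PySem.Dict.getD_foldl_modify_append)
lemma getD_groups (l : List (Int × String)) (c : String) :
    ((l.foldl (fun d p => d.modify p.2 [] (fun x => x ++ [p.1])) PySem.Dict.empty).getD c [])
      = (l.filter (fun p => p.2 == c)).map (·.1) := by
  have h := PySem.Dict.getD_foldl_modify_append (l.map Prod.swap) (PySem.Dict.empty) c
  simpa [List.foldl_map, List.filter_map, List.map_map, Function.comp] using h

lemma getD_groups' (r : List Int) (key : Int → String) (c : String) :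
    ((r.foldl (fun d j => d.modify (key j) [] (fun x => x ++ [j])) PySem.Dict.empty).getD c [])
      = r.filter (fun j => key j == c) := by
  have h := getD_groups (r.map (fun j => (j, key j))) c
  simpa [List.foldl_map, List.filter_map, List.map_map, Function.comp_def] using h

lemma filter_group_eq (n i : Int) (key : Int → String) (h0 : 0 ≤ i) (hn : i < n) :
    ((PySem.List.pyRange 0 n).filter (fun j => key j == key i)).filter (fun j => decide (i < j))
      = (PySem.List.pyRange (i+1) n).filter (fun j => decide (key i = key j)) := by
  rw [List.filter_filter, PySem.List.pyRange_one_append 0 (i+1) n (by omega) (by omega),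
      List.filter_append]
  have h1 : (PySem.List.pyRange 0 (i+1)).filter (fun a => decide (i < a) && (key a == key i)) = [] := by
    apply List.filter_eq_nil_iff.2
    intro a ha
    have := PySem.List.mem_pyRange_one.1 ha
    simp only [Bool.and_eq_true, decide_eq_true_eq]
    rintro ⟨h, -⟩; omega
  rw [h1, List.nil_append]
  apply List.filter_congr
  intro a ha
  have hm := PySem.List.mem_pyRange_one.1 ha
  have hlt : i < a := by omega
  simp only [hlt, decide_true, Bool.true_and]
  rw [Bool.eq_iff_iff]
  simp only [beq_iff_eq, decide_eq_true_eq]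
  exact eq_comm

theorem encontrar_duplicado_eq (lista : List String) :
    encontrar_duplicado lista = encontrar_duplicado_alt lista := by
  unfold encontrar_duplicado encontrar_duplicado_alt
  have hkey : ∀ j : Int, PySem.List.pyGetD (lista.map PySem.Str.lower) j "" = PySem.Str.lower (PySem.List.pyGetD lista j "") := by
    intro j
    have h0 : PySem.Str.lower "" = "" := by decide
    simpa [h0] using (PySem.List.pyGetD_map PySem.Str.lower lista j "")
  have hlen : PySem.List.len (lista.map PySem.Str.lower) = PySem.List.len lista := by
    simp [PySem.List.len]
  have henum := PySem.List.enumerate_eq_map_pyRange (lista.map PySem.Str.lower) ""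
  simp only [henum, List.foldl_map, hlen, hkey, getD_groups']
  apply PySem.List.foldl_congr_mem
  intro acc i hi
  obtain ⟨hi0, hin⟩ := PySem.List.mem_pyRange_one.1 hi
  rw [PySem.List.foldl_append_ite, PySem.List.foldl_append_ite]
  congr 1
  rw [filter_group_eq _ _ _ hi0 hin]

-- ===== VERDICT (by name: the statement is the Claim_ definition above) =====
theorem encontrar_duplicado_spec : Claim_equal_encontrar_duplicado := by
  intro lista _
  exact encontrar_duplicado_eq lista
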